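-- pv_equiv track=rewrite | github.com/JinleLiu/InfoCoordiBridge | ica_module_package/ica_module/icabridge/association.py | _class_compatible_name
-- ===== SOURCE A (Python) =====
-- def _class_compatible_name(a: str, b: str) -> bool:
--     a = a.lower()
--     b = b.lower()
--     if a == "unknown" or b == "unknown" or a == b:
--         return True
--     aliases = [
--         {"car", "van", "suv", "mpv"},
--         {"bus", "truck", "construction_vehicle", "trailer"},
--         {"pedestrian", "adult", "child", "human"},
--         {"bicycle", "cyclist"},
--         {"motorcycle", "motorcyclist"},
--     ]
--     return any(a in s and b in s for s in aliases)
-- ===== SOURCE B (Python) =====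
-- # Canonical-form reduction: every alias is rewritten to its group's representative
-- # name; names outside every group are already canonical.  Two names are compatible
-- # iff either is the "unknown" wildcard or their canonical forms coincide.
-- _CANON = {
--     "car": "car", "van": "car", "suv": "car", "mpv": "car",
--     "bus": "bus", "truck": "bus", "construction_vehicle": "bus", "trailer": "bus",
--     "pedestrian": "pedestrian", "adult": "pedestrian", "child": "pedestrian", "human": "pedestrian",
--     "bicycle": "bicycle", "cyclist": "bicycle",
--     "motorcycle": "motorcycle", "motorcyclist": "motorcycle",
-- }
--
-- def _class_compatible_name(a: str, b: str) -> bool: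
--     a = a.lower()
--     b = b.lower()
--     a = _CANON.get(a, a)
--     b = _CANON.get(b, b)
--     return a == "unknown" or b == "unknown" or a == b
-- ===== Notes on version B (the rewrite author's own statement) =====
-- stated objective: idiomatic
-- what changed: Replaces A's guarded scan over a list of alias sets by canonical-form reduction: each name is independently normalized to its alias group's representative (identity for names outside every group), after which compatibility is a single wildcard-or-equality test with no group loop and no membership guard.
import Mathlib
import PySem

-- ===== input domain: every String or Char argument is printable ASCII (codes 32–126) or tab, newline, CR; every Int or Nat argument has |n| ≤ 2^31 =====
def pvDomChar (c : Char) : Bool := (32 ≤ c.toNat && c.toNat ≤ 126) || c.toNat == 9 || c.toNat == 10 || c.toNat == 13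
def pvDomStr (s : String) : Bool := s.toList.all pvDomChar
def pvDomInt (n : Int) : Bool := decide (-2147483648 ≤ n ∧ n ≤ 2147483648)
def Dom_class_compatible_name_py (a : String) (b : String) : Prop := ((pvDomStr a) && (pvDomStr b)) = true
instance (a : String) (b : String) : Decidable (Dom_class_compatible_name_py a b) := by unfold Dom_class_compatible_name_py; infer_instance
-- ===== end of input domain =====

-- B replaces A's guarded scan over alias sets by canonical-form reduction (normalize each
-- name to its group representative, then one wildcard-or-equality test); idiomatic rewrite,
-- return values proved identical.

-- ===== PORT A =====
-- A's list of alias sets (built inside the Python function on every call)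
def pvSets : List (PySem.Set String) :=
  [PySem.Set.ofList ["car","van","suv","mpv"],
   PySem.Set.ofList ["bus","truck","construction_vehicle","trailer"],
   PySem.Set.ofList ["pedestrian","adult","child","human"],
   PySem.Set.ofList ["bicycle","cyclist"],
   PySem.Set.ofList ["motorcycle","motorcyclist"]]

def class_compatible_name_py (a : String) (b : String) : Bool :=
  let a := PySem.Str.lower a
  let b := PySem.Str.lower b
  if a == "unknown" || b == "unknown" || a == b then true
  else
    let aliases := pvSets
    aliases.any (fun s => PySem.Set.contains s a && PySem.Set.contains s b)

-- ===== PORT B =====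
-- Source B's module-level canonicalization dict _CANON
def canonDict : PySem.Dict String String := PySem.Dict.ofList
  [("car","car"),("van","car"),("suv","car"),("mpv","car"),
   ("bus","bus"),("truck","bus"),("construction_vehicle","bus"),("trailer","bus"),
   ("pedestrian","pedestrian"),("adult","pedestrian"),("child","pedestrian"),("human","pedestrian"),
   ("bicycle","bicycle"),("cyclist","bicycle"),
   ("motorcycle","motorcycle"),("motorcyclist","motorcycle")]

def class_compatible_name_py_alt (a : String) (b : String) : Bool :=
  let a := PySem.Str.lower a
  let b := PySem.Str.lower b
  let a := PySem.Dict.getD canonDict a a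
  let b := PySem.Dict.getD canonDict b b
  a == "unknown" || b == "unknown" || a == b

-- ===== PRECONDITION & SPEC =====
def Spec_class_compatible_name_py (a : String) (b : String) (out : Bool) : Prop := out = class_compatible_name_py_alt a b
instance (a : String) (b : String) (out : Bool) : Decidable (Spec_class_compatible_name_py a b out) := by unfold Spec_class_compatible_name_py; infer_instance

-- ===== CLAIM (what is proved, stated in full; the proofs are below) =====
def Claim_equal_class_compatible_name_py : Prop := ∀ (a : String) (b : String), Dom_class_compatible_name_py a b → Spec_class_compatible_name_py a b (class_compatible_name_py a b)

-- ===== LEMMAS AND PROOFS =====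

-- Every name x is either one of the 16 alias names (each handled by `decide`) or none of
-- them; the lemma relates each set-membership of x to a comparison of x's canonical form
-- with that group's representative, and classifies the canonical form itself: it is x
-- (with x different from every representative) or one of the five representatives
-- (with x ≠ "unknown").
theorem pv_classify (x : String) :
    ((PySem.Set.ofList ["car","van","suv","mpv"]).contains x = (PySem.Dict.getD canonDict x x == "car")) ∧
    ((PySem.Set.ofList ["bus","truck","construction_vehicle","trailer"]).contains x = (PySem.Dict.getD canonDict x x == "bus")) ∧
    ((PySem.Set.ofList ["pedestrian","adult","child","human"]).contains x = (PySem.Dict.getD canonDict x x == "pedestrian")) ∧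
    ((PySem.Set.ofList ["bicycle","cyclist"]).contains x = (PySem.Dict.getD canonDict x x == "bicycle")) ∧
    ((PySem.Set.ofList ["motorcycle","motorcyclist"]).contains x = (PySem.Dict.getD canonDict x x == "motorcycle")) ∧
    ((PySem.Dict.getD canonDict x x = x ∧ (x == "car") = false ∧ (x == "bus") = false ∧
        (x == "pedestrian") = false ∧ (x == "bicycle") = false ∧ (x == "motorcycle") = false) ∨
     ((PySem.Dict.getD canonDict x x = "car" ∨ PySem.Dict.getD canonDict x x = "bus" ∨
        PySem.Dict.getD canonDict x x = "pedestrian" ∨ PySem.Dict.getD canonDict x x = "bicycle" ∨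
        PySem.Dict.getD canonDict x x = "motorcycle") ∧ (x == "unknown") = false)) := by
  rcases eq_or_ne "car" x with h0 | h0
  · subst h0; decide
  rcases eq_or_ne "van" x with h1 | h1
  · subst h1; decide
  rcases eq_or_ne "suv" x with h2 | h2
  · subst h2; decide
  rcases eq_or_ne "mpv" x with h3 | h3
  · subst h3; decide
  rcases eq_or_ne "bus" x with h4 | h4
  · subst h4; decide
  rcases eq_or_ne "truck" x with h5 | h5
  · subst h5; decide
  rcases eq_or_ne "construction_vehicle" x with h6 | h6
  · subst h6; decide
  rcases eq_or_ne "trailer" x with h7 | h7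
  · subst h7; decide
  rcases eq_or_ne "pedestrian" x with h8 | h8
  · subst h8; decide
  rcases eq_or_ne "adult" x with h9 | h9
  · subst h9; decide
  rcases eq_or_ne "child" x with h10 | h10
  · subst h10; decide
  rcases eq_or_ne "human" x with h11 | h11
  · subst h11; decide
  rcases eq_or_ne "bicycle" x with h12 | h12
  · subst h12; decide
  rcases eq_or_ne "cyclist" x with h13 | h13
  · subst h13; decide
  rcases eq_or_ne "motorcycle" x with h14 | h14
  · subst h14; decide
  rcases eq_or_ne "motorcyclist" x with h15 | h15
  · subst h15; decide
  simp [canonDict, PySem.Dict.ofList, PySem.Dict.getD, PySem.Dict.update, List.foldl,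
    PySem.Dict.get?_insert, PySem.Dict.get?_empty, PySem.Set.ofList, PySem.Set.contains,
    Ne.symm h0, Ne.symm h1, Ne.symm h2, Ne.symm h3, Ne.symm h4, Ne.symm h5, Ne.symm h6,
    Ne.symm h7, Ne.symm h8, Ne.symm h9, Ne.symm h10, Ne.symm h11, Ne.symm h12, Ne.symm h13,
    Ne.symm h14, Ne.symm h15]

-- On the guard-false branch (neither name is "unknown" and they differ), A's scan over the
-- five sets equals the comparison of the two canonical forms, and neither canonical form
-- is "unknown".
theorem pv_core_eq (x y : String) (hxu : (x == "unknown") = false)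
    (hyu : (y == "unknown") = false) (hxy : (x == y) = false) :
    pvSets.any (fun s => PySem.Set.contains s x && PySem.Set.contains s y) =
    (PySem.Dict.getD canonDict x x == "unknown" || PySem.Dict.getD canonDict y y == "unknown" ||
     PySem.Dict.getD canonDict x x == PySem.Dict.getD canonDict y y) := by
  obtain ⟨e0, e1, e2, e3, e4, hx⟩ := pv_classify x
  obtain ⟨f0, f1, f2, f3, f4, hy⟩ := pv_classify y
  simp only [pvSets, List.any_cons, List.any_nil, Bool.or_false, e0, e1, e2, e3, e4, f0, f1, f2, f3, f4]
  rcases hx with ⟨hcx, hx0, hx1, hx2, hx3, hx4⟩ | ⟨hcx, _⟩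
  · rcases hy with ⟨hcy, hy0, hy1, hy2, hy3, hy4⟩ | ⟨hcy, _⟩
    · rw [hcx, hcy]; simp [hx0, hx1, hx2, hx3, hx4, hy0, hy1, hy2, hy3, hy4, hxu, hyu, hxy]
    · rcases hcy with h | h | h | h | h <;> rw [hcx, h] <;>
        simp [hx0, hx1, hx2, hx3, hx4, hxu]
  · rcases hy with ⟨hcy, hy0, hy1, hy2, hy3, hy4⟩ | ⟨hcy, _⟩
    · rcases hcx with h | h | h | h | h <;> rw [hcy, h] <;>
        simp [hy0, hy1, hy2, hy3, hy4, hyu, BEq.comm]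
    · rcases hcx with h | h | h | h | h <;> rcases hcy with h' | h' | h' | h' | h' <;>
        rw [h, h'] <;> decide

-- ===== VERDICT (by name: the statement is the Claim_ definition above) =====
theorem class_compatible_name_py_spec : Claim_equal_class_compatible_name_py := by
  intro a b _
  unfold Spec_class_compatible_name_py class_compatible_name_py class_compatible_name_py_alt
  by_cases h : (PySem.Str.lower a == "unknown" || PySem.Str.lower b == "unknown" ||
      PySem.Str.lower a == PySem.Str.lower b) = true
  · simp only [h, if_true]
    rcases Bool.or_eq_true_iff.mp h with h' | h'
    · rcases Bool.or_eq_true_iff.mp h' with h'' | h''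
      · rw [eq_of_beq h'']
        have hc : PySem.Dict.getD canonDict "unknown" "unknown" = "unknown" := by decide
        simp [hc]
      · rw [eq_of_beq h'']
        have hc : PySem.Dict.getD canonDict "unknown" "unknown" = "unknown" := by decide
        simp [hc]
    · rw [eq_of_beq h']
      simp
  · simp only [Bool.not_eq_true, Bool.or_eq_false_iff] at h
    obtain ⟨⟨hxu, hyu⟩, hxy⟩ := h
    simp only [hxu, hyu, hxy, Bool.or_self, Bool.false_eq_true, if_false]
    exact pv_core_eq (PySem.Str.lower a) (PySem.Str.lower b) hxu hyu hxy
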